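-- pv_equiv track=rewrite | github.com/ZedRover/alphagen | log_reader.py | add_empty_lines
-- ===== SOURCE A (Python) =====
-- def add_empty_lines(log_content: str) -> str:
--     lines = log_content.split("\n")
--     new_lines = []
--     for i, line in enumerate(lines):
--         new_lines.append(line)
--         if i < len(lines) - 1 and lines[i + 1].startswith("pool/best_ic_ret"):
--             new_lines.append("")
--     return "\n".join(new_lines)
-- ===== SOURCE B (Python) =====
-- def add_empty_lines(log_content: str) -> str:
--     return log_content.replace("\npool/best_ic_ret", "\n\npool/best_ic_ret")
-- ===== Notes on version B (the rewrite author's own statement) =====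
-- stated objective: idiomatic
-- what changed: Replaces the split / enumerate-with-lookahead loop / join pipeline by a single str.replace that rewrites every newline immediately followed by the marker into a doubled newline plus the marker.
import Mathlib
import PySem

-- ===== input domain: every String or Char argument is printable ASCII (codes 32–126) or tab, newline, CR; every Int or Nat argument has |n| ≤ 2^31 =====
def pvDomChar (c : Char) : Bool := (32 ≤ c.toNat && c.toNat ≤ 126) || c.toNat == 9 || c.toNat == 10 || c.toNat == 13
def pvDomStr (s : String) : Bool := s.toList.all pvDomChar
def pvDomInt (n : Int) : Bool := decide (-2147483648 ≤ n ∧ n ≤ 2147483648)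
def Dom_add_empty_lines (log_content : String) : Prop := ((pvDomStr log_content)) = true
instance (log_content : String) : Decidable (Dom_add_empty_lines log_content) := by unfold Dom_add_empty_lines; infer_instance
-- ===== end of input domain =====

-- B replaces A's split / indexed-lookahead loop / join by one str.replace over the raw string (idiomatic; return value only).

-- ===== PORT A =====
-- A: split on "\n", loop with enumerate appending each line and a blank one when the NEXT line starts with the marker, join with "\n".
def add_empty_lines (log_content : String) : String :=
  let lines : List (List Char) := PySem.Chars.splitOn log_content.toList ['\n']
  let new_lines : List (List Char) :=
    (PySem.List.enumerate lines).foldl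
      (fun acc il =>
        let acc := acc ++ [il.2]
        if il.1 < (lines.length : Int) - 1 &&
            PySem.Chars.startswith (PySem.List.pyGetD lines (il.1 + 1) []) "pool/best_ic_ret".toList
        then acc ++ [[]] else acc) []
  String.ofList (PySem.Chars.join ['\n'] new_lines)

-- ===== PORT B =====
-- B: log_content.replace("\npool/best_ic_ret", "\n\npool/best_ic_ret")
def add_empty_lines_alt (log_content : String) : String :=
  PySem.Str.replace log_content "\npool/best_ic_ret" "\n\npool/best_ic_ret"

-- ===== PRECONDITION & SPEC =====
def Spec_add_empty_lines (log_content : String) (out : String) : Prop := out = add_empty_lines_alt log_content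
instance (log_content : String) (out : String) : Decidable (Spec_add_empty_lines log_content out) := by unfold Spec_add_empty_lines; infer_instance

-- ===== CLAIM (what is proved, stated in full; the proofs are below) =====
def Claim_equal_add_empty_lines : Prop := ∀ (log_content : String), Dom_add_empty_lines log_content → Spec_add_empty_lines log_content (add_empty_lines log_content)

-- ===== LEMMAS AND PROOFS =====

-- clean structural split on '\n'
def pvSplit : List Char → List (List Char)
  | [] => [[]]
  | c :: t => if c = '\n' then [] :: pvSplit t else (pvSplit t).modifyHead (c :: ·)

-- clean replace (old nonempty)
def pvRepl (old new : List Char) : List Char → List Char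
  | [] => []
  | c :: t =>
    if old.isPrefixOf (c :: t) then new ++ pvRepl old new (t.drop (old.length - 1))
    else c :: pvRepl old new t
  termination_by l => l.length
  decreasing_by
  all_goals simp [List.length_drop]

-- clean blank-line insertion before marker-starting successors
def pvIns (m : List Char) : List (List Char) → List (List Char)
  | [] => []
  | [a] => [a]
  | a :: b :: rest => a :: (if m.isPrefixOf b then [] :: pvIns m (b :: rest) else pvIns m (b :: rest))

theorem pvModifyHead_comp {α : Type} (f g : List α → List α) (ls : List (List α)) :
    (ls.modifyHead f).modifyHead g = ls.modifyHead (fun x => g (f x)) := by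
  cases ls <;> simp

theorem pvModifyHead_id (ls : List (List Char)) :
    ls.modifyHead (fun x => x) = ls := by
  cases ls <;> simp

theorem pvRepl_nil (old new : List Char) : pvRepl old new [] = [] := by
  rw [pvRepl.eq_def]

theorem pvRepl_cons (old new : List Char) (c : Char) (t : List Char) :
    pvRepl old new (c :: t) =
      if old.isPrefixOf (c :: t) then new ++ pvRepl old new (t.drop (old.length - 1))
      else c :: pvRepl old new t := by
  rw [pvRepl.eq_def]

theorem pvSplit_cons_nl (t : List Char) : pvSplit ('\n' :: t) = [] :: pvSplit t := by
  simp [pvSplit]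

theorem pvSplit_ne_nil (l : List Char) : pvSplit l ≠ [] := by
  induction l with
  | nil => simp [pvSplit]
  | cons c t ih =>
    simp only [pvSplit]
    split
    · simp
    · cases h : pvSplit t with
      | nil => exact absurd h ih
      | cons a rest => simp

theorem pvIns_ne_nil (m : List Char) (ls : List (List Char)) (h : ls ≠ []) : pvIns m ls ≠ [] := by
  match ls with
  | [] => exact absurd rfl h
  | [a] => simp [pvIns]
  | a :: b :: rest => simp only [pvIns]; split <;> simp

-- splitOn.go agrees with pvSplit
theorem splitOn_go_eq (fuel : Nat) (l cur : List Char) (acc : List (List Char))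
    (h : l.length ≤ fuel) :
    PySem.Chars.splitOn.go ['\n'] fuel l cur acc =
      acc.reverse ++ ((pvSplit l).modifyHead (cur.reverse ++ ·)) := by
  induction fuel generalizing l cur acc with
  | zero =>
    have : l = [] := by cases l <;> simp_all
    subst this
    rw [PySem.Chars.splitOn.go]
    simp [pvSplit]
  | succ f ih =>
    cases l with
    | nil =>
      rw [PySem.Chars.splitOn.go]
      simp [pvSplit]
      omega
    | cons c t =>
      rw [PySem.Chars.splitOn.go]
      by_cases hc : c = '\n'
      · subst hc
        have hpre : List.isPrefixOf ['\n'] ('\n' :: t) = true := by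
          simp [List.isPrefixOf]
        rw [if_pos hpre]
        have hdr : List.drop (['\n'] : List Char).length ('\n' :: t) = t := by simp
        rw [hdr]
        have ht : t.length ≤ f := by simpa using h
        rw [ih _ _ _ ht]
        simp [pvSplit, pvModifyHead_id]
      · have hpre : List.isPrefixOf ['\n'] (c :: t) = false := by
          simp [List.isPrefixOf, Ne.symm hc]
        rw [if_neg (by simp [hpre])]
        have ht : t.length ≤ f := by simpa using h
        rw [ih _ _ _ ht]
        simp only [pvSplit, if_neg hc, pvModifyHead_comp]
        congr 2
        funext x
        simp

theorem splitOn_eq (l : List Char) : PySem.Chars.splitOn l ['\n'] = pvSplit l := by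
  rw [PySem.Chars.splitOn, splitOn_go_eq _ _ _ _ (by omega)]
  simp [pvModifyHead_id]

-- replace.go agrees with pvRepl
theorem replace_go_eq (old new : List Char) (hold : old ≠ []) (fuel : Nat) (l acc : List Char)
    (h : l.length ≤ fuel) :
    PySem.Chars.replace.go old new fuel l acc = acc.reverse ++ pvRepl old new l := by
  induction fuel generalizing l acc with
  | zero =>
    have : l = [] := by cases l <;> simp_all
    subst this
    rw [PySem.Chars.replace.go]
    simp [pvRepl_nil]
  | succ f ih =>
    cases l with
    | nil =>
      rw [PySem.Chars.replace.go]
      simp [pvRepl_nil]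
      omega
    | cons c t =>
      rw [PySem.Chars.replace.go]
      by_cases hp : old.isPrefixOf (c :: t) = true
      · rw [if_pos hp]
        obtain ⟨k, hk⟩ : ∃ k, old.length = k + 1 := by
          cases old with
          | nil => exact absurd rfl hold
          | cons a b => exact ⟨b.length, by simp⟩
        have hdrop : List.drop old.length (c :: t) = t.drop (old.length - 1) := by
          rw [hk]; simp
        have hlen : (List.drop old.length (c :: t)).length ≤ f := by
          simp only [List.length_drop]
          simp only [List.length_cons] at h ⊢
          omega
        rw [ih _ _ hlen, hdrop]
        rw [pvRepl_cons, if_pos hp]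
        simp
      · rw [if_neg hp]
        have ht : t.length ≤ f := by simp at h; omega
        rw [ih _ _ ht]
        rw [pvRepl_cons, if_neg hp]
        simp

theorem replace_eq (old new l : List Char) (hold : old ≠ []) :
    PySem.Chars.replace l old new = pvRepl old new l := by
  rw [PySem.Chars.replace, if_neg (by simp [List.isEmpty_iff, hold])]
  exact replace_go_eq old new hold _ _ _ le_rfl

-- the marker
def pvM : List Char := "pool/best_ic_ret".toList

theorem pvM_no_nl : '\n' ∉ pvM := by decide

-- pvIns commutes with modifying the head
theorem pvIns_modifyHead (m : List Char) (g : List Char → List Char) (ls : List (List Char)) :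
    pvIns m (ls.modifyHead g) = (pvIns m ls).modifyHead g := by
  match ls with
  | [] => simp [pvIns]
  | [a] => simp [pvIns]
  | a :: b :: rest =>
    simp only [List.modifyHead, pvIns]

theorem pvIntercalate_cons_cons (sep a b : List Char) (rest : List (List Char)) :
    List.intercalate sep (a :: b :: rest) = a ++ sep ++ List.intercalate sep (b :: rest) := by
  simp [List.intercalate, List.intersperse]

-- intercalate over modified head
theorem intercalate_modifyHead (sep p : List Char) (ls : List (List Char)) (h : ls ≠ []) :
    List.intercalate sep (ls.modifyHead (p ++ ·)) = p ++ List.intercalate sep ls := by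
  match ls with
  | [] => exact absurd rfl h
  | [a] => simp [List.intercalate]
  | a :: b :: rest =>
    simp only [List.modifyHead, pvIntercalate_cons_cons]
    simp [List.append_assoc]

-- splitting a string that starts with a '\n'-free prefix
theorem pvSplit_append (p u : List Char) (hp : '\n' ∉ p) :
    pvSplit (p ++ u) = (pvSplit u).modifyHead (p ++ ·) := by
  induction p with
  | nil => simp [pvModifyHead_id]
  | cons c p ih =>
    have hc : c ≠ '\n' := by simp at hp; exact Ne.symm hp.1
    have hp' : '\n' ∉ p := by simp at hp; exact fun h => hp.2 h
    simp only [List.cons_append, pvSplit, if_neg hc, ih hp', pvModifyHead_comp]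

-- the head of pvSplit t starts with m iff t does (for '\n'-free m)
theorem pvSplit_head_prefix (m t : List Char) (hm : '\n' ∉ m) :
    m.isPrefixOf ((pvSplit t).headI) = m.isPrefixOf t := by
  induction t generalizing m with
  | nil => cases m <;> simp [pvSplit, List.isPrefixOf]
  | cons c t ih =>
    by_cases hc : c = '\n'
    · subst hc
      simp only [pvSplit_cons_nl, List.headI]
      cases m with
      | nil => simp [List.isPrefixOf]
      | cons d m' =>
        have hd : d ≠ '\n' := by simp at hm; exact Ne.symm hm.1
        simp [List.isPrefixOf]
        exact fun hx => absurd hx hd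
    · obtain ⟨a, rest, hsp⟩ : ∃ a rest, pvSplit t = a :: rest := by
        cases h : pvSplit t with
        | nil => exact absurd h (pvSplit_ne_nil t)
        | cons a rest => exact ⟨a, rest, rfl⟩
      simp only [pvSplit, if_neg hc, hsp, List.modifyHead, List.headI]
      cases m with
      | nil => simp [List.isPrefixOf]
      | cons d m' =>
        have hm' : '\n' ∉ m' := by simp at hm; exact fun h => hm.2 h
        have := ih m' hm'
        rw [hsp] at this
        simp only [List.headI] at this
        simp [List.isPrefixOf, this]

-- MAIN: character-level replace = split, insert blanks, join
theorem repl_eq_ins_aux : ∀ (n : Nat) (cs : List Char), cs.length ≤ n →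
    pvRepl ('\n' :: pvM) ('\n' :: '\n' :: pvM) cs =
      List.intercalate ['\n'] (pvIns pvM (pvSplit cs)) := by
  intro n
  induction n with
  | zero =>
    intro cs h
    have : cs = [] := by cases cs <;> simp_all
    subst this
    simp [pvRepl_nil, pvSplit, pvIns, List.intercalate]
  | succ n ih =>
    intro cs h
    cases cs with
    | nil => simp [pvRepl_nil, pvSplit, pvIns, List.intercalate]
    | cons c t =>
      by_cases hc : c = '\n'
      · subst hc
        by_cases hm : pvM.isPrefixOf t = true
        · -- markered line follows
          obtain ⟨u, hu⟩ : ∃ u, t = pvM ++ u := by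
            rw [List.isPrefixOf_iff_prefix] at hm
            exact hm.imp (fun u h => h.symm)
          have hpre : List.isPrefixOf ('\n' :: pvM) ('\n' :: t) = true := by
            simp [List.isPrefixOf, hm]
          rw [pvRepl_cons, if_pos hpre]
          have hdrop : t.drop (('\n' :: pvM).length - 1) = u := by
            subst hu; simp [pvM]
          rw [hdrop]
          have hu_len : u.length ≤ n := by
            subst hu
            simp only [List.length_cons, List.length_append] at h ⊢
            have : pvM.length = 16 := by decide
            omega
          rw [ih u hu_len]
          -- right-hand side
          have hsp : pvSplit ('\n' :: t) = [] :: (pvSplit u).modifyHead (pvM ++ ·) := by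
            rw [pvSplit_cons_nl, hu, pvSplit_append _ _ pvM_no_nl]
          rw [hsp]
          obtain ⟨a, rest, hau⟩ : ∃ a rest, pvSplit u = a :: rest := by
            cases hx : pvSplit u with
            | nil => exact absurd hx (pvSplit_ne_nil u)
            | cons a rest => exact ⟨a, rest, rfl⟩
          rw [hau]
          simp only [List.modifyHead]
          have hpm : pvM.isPrefixOf (pvM ++ a) = true := by
            rw [List.isPrefixOf_iff_prefix]; exact ⟨a, rfl⟩
          rw [show pvIns pvM ([] :: (pvM ++ a) :: rest) =
                [] :: [] :: pvIns pvM ((pvM ++ a) :: rest) by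
              simp [pvIns, hpm]]
          have : pvIns pvM ((pvM ++ a) :: rest) =
              (pvIns pvM (a :: rest)).modifyHead (pvM ++ ·) := by
            have := pvIns_modifyHead pvM (pvM ++ ·) (a :: rest)
            simpa using this
          rw [this]
          obtain ⟨p, ps, hpp⟩ : ∃ p ps, pvIns pvM (a :: rest) = p :: ps := by
            cases hx : pvIns pvM (a :: rest) with
            | nil => exact absurd hx (pvIns_ne_nil _ _ (by simp))
            | cons p ps => exact ⟨p, ps, rfl⟩
          rw [hpp]
          simp only [List.modifyHead]
          rw [pvIntercalate_cons_cons, pvIntercalate_cons_cons]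
          have h2 := intercalate_modifyHead ['\n'] pvM (p :: ps) (by simp)
          simp only [List.modifyHead] at h2
          rw [h2]
          simp
        · -- no marker follows this newline
          have hmf : pvM.isPrefixOf t = false := by
            cases hx : pvM.isPrefixOf t
            · rfl
            · exact absurd hx hm
          have hpre : List.isPrefixOf ('\n' :: pvM) ('\n' :: t) = false := by
            simp [List.isPrefixOf, hmf]
          rw [pvRepl_cons, if_neg (by simp [hpre])]
          have ht : t.length ≤ n := by simp at h; omega
          rw [ih t ht]
          obtain ⟨a, rest, hau⟩ : ∃ a rest, pvSplit t = a :: rest := by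
            cases hx : pvSplit t with
            | nil => exact absurd hx (pvSplit_ne_nil t)
            | cons a rest => exact ⟨a, rest, rfl⟩
          have hhead : pvM.isPrefixOf a = false := by
            have := pvSplit_head_prefix pvM t pvM_no_nl
            rw [hau] at this
            simp only [List.headI] at this
            rw [this, hmf]
          rw [pvSplit_cons_nl]
          rw [hau]
          rw [show pvIns pvM ([] :: a :: rest) = [] :: pvIns pvM (a :: rest) by
              simp [pvIns, hhead]]
          obtain ⟨p, ps, hpp⟩ : ∃ p ps, pvIns pvM (a :: rest) = p :: ps := by
            cases hx : pvIns pvM (a :: rest) with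
            | nil => exact absurd hx (pvIns_ne_nil _ _ (by simp))
            | cons p ps => exact ⟨p, ps, rfl⟩
          rw [hpp, pvIntercalate_cons_cons]
          simp
      · -- ordinary character
        have hpre : List.isPrefixOf ('\n' :: pvM) (c :: t) = false := by
          simp [List.isPrefixOf, Ne.symm hc]
        rw [pvRepl_cons, if_neg (by simp [hpre])]
        have ht : t.length ≤ n := by simp at h; omega
        rw [ih t ht]
        rw [show pvSplit (c :: t) = (pvSplit t).modifyHead (c :: ·) by
            simp [pvSplit, hc]]
        rw [pvIns_modifyHead]
        have : (pvIns pvM (pvSplit t)).modifyHead (c :: ·) =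
            (pvIns pvM (pvSplit t)).modifyHead ([c] ++ ·) := rfl
        rw [this, intercalate_modifyHead _ _ _ (pvIns_ne_nil _ _ (pvSplit_ne_nil t))]
        simp

theorem repl_eq_ins (cs : List Char) :
    pvRepl ('\n' :: pvM) ('\n' :: '\n' :: pvM) cs =
      List.intercalate ['\n'] (pvIns pvM (pvSplit cs)) :=
  repl_eq_ins_aux cs.length cs le_rfl

-- A's foldl over enumerate computes pvIns of the line list
theorem foldl_eq_ins (lines : List (List Char)) (n : Nat) (acc : List (List Char))
    (suffix : List (List Char)) (h : lines.drop n = suffix) :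
    (PySem.List.enumerate suffix (n : Int)).foldl
      (fun acc il =>
        let acc := acc ++ [il.2]
        if il.1 < (lines.length : Int) - 1 &&
            PySem.Chars.startswith (PySem.List.pyGetD lines (il.1 + 1) []) pvM
        then acc ++ [[]] else acc) acc = acc ++ pvIns pvM suffix := by
  induction suffix generalizing n acc with
  | nil => simp [PySem.List.enumerate, pvIns]
  | cons a rest ih =>
    have hdrop1 : lines.drop (n + 1) = rest := by
      have : lines.drop (n + 1) = (lines.drop n).drop 1 := by
        rw [List.drop_drop]
      rw [this, h]
      simp
    rw [PySem.List.enumerate_cons, List.foldl_cons]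
    cases rest with
    | nil =>
      have hlen : lines.length ≤ n + 1 := by
        rw [← List.drop_eq_nil_iff, hdrop1]
      have hcond : ¬ ((n : Int) < (lines.length : Int) - 1) := by omega
      rw [if_neg (by simp [hcond])]
      simp [PySem.List.enumerate, pvIns]
    | cons b rest' =>
      have hlt : n + 1 < lines.length := by
        by_contra hx
        have : lines.drop (n + 1) = [] := by
          rw [List.drop_eq_nil_iff]; omega
        rw [hdrop1] at this
        exact absurd this (by simp)
      have hcond : (n : Int) < (lines.length : Int) - 1 := by omega
      have hb : PySem.List.pyGetD lines ((n : Int) + 1) [] = b := by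
        have hcast : (n : Int) + 1 = ((n + 1 : Nat) : Int) := by push_cast; ring
        rw [hcast, PySem.List.pyGetD_natCast]
        have hsome : lines[n + 1]? = some b := by
          have h0 : (lines.drop (n + 1))[0]? = some b := by rw [hdrop1]; rfl
          rw [List.getElem?_drop] at h0
          simpa using h0
        simp [List.getD, hsome]
      have hsw : PySem.Chars.startswith b pvM = pvM.isPrefixOf b := rfl
      have hstep : ∀ (acc' : List (List Char)),
          (PySem.List.enumerate (b :: rest') ((n : Int) + 1)).foldl
            (fun acc il =>
              let acc := acc ++ [il.2]
              if il.1 < (lines.length : Int) - 1 &&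
                  PySem.Chars.startswith (PySem.List.pyGetD lines (il.1 + 1) []) pvM
              then acc ++ [[]] else acc) acc' = acc' ++ pvIns pvM (b :: rest') := by
        intro acc'
        have hcast : (n : Int) + 1 = ((n + 1 : Nat) : Int) := by push_cast; ring
        rw [hcast]
        exact ih (n + 1) acc' hdrop1
      by_cases hbm : pvM.isPrefixOf b = true
      · rw [if_pos (by simp [hb, hsw, hbm, hcond])]
        rw [hstep]
        simp [pvIns, hbm, List.append_assoc]
      · rw [if_neg (by simp [hb, hsw, hcond]; simpa using hbm)]
        rw [hstep]
        simp only [pvIns]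
        rw [if_neg hbm]
        simp [List.append_assoc]

-- ===== VERDICT (by name: the statement is the Claim_ definition above) =====
theorem add_empty_lines_spec : Claim_equal_add_empty_lines := by
  intro s _
  unfold Spec_add_empty_lines add_empty_lines add_empty_lines_alt
  rw [PySem.Str.replace]
  have hold : ("\npool/best_ic_ret".toList : List Char) = '\n' :: pvM := by decide
  have hnew : ("\n\npool/best_ic_ret".toList : List Char) = '\n' :: '\n' :: pvM := by decide
  rw [hold, hnew, replace_eq _ _ _ (by simp)]
  dsimp only
  rw [splitOn_eq]
  have hfold := foldl_eq_ins (pvSplit s.toList) 0 [] (pvSplit s.toList) (by simp)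
  simp only [Nat.cast_zero] at hfold
  rw [show ("pool/best_ic_ret".toList : List Char) = pvM from rfl] at *
  rw [hfold]
  rw [show PySem.Chars.join ['\n'] = List.intercalate ['\n'] from rfl]
  rw [repl_eq_ins]
  simp
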